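-- pv_equiv track=rewrite | github.com/MarcoPolo483/eva-rag | src/eva_rag/loaders/web_crawler_loader.py | _should_skip_url
-- ===== SOURCE A (Python) =====
-- def _should_skip_url(url: str) -> bool:
--     """
--     Check if URL should be skipped (binary files, etc.).
--
--     Args:
--         url: URL to check
--
--     Returns:
--         True if URL should be skipped
--     """
--     skip_extensions = (
--         ".pdf", ".jpg", ".jpeg", ".png", ".gif", ".svg", ".webp",
--         ".zip", ".tar", ".gz", ".mp4", ".mp3", ".avi", ".mov",
--         ".doc", ".docx", ".xls", ".xlsx", ".ppt", ".pptx",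
--         ".css", ".js", ".json", ".xml", ".rss",
--     )
--
--     url_lower = url.lower()
--     return any(url_lower.endswith(ext) for ext in skip_extensions)
-- ===== SOURCE B (Python) =====
-- _SKIP_EXT_NAMES = frozenset((
--     "pdf", "jpg", "jpeg", "png", "gif", "svg", "webp",
--     "zip", "tar", "gz", "mp4", "mp3", "avi", "mov",
--     "doc", "docx", "xls", "xlsx", "ppt", "pptx",
--     "css", "js", "json", "xml", "rss",
-- ))
--
--
-- def _should_skip_url(url: str) -> bool:
--     """True iff the URL ends with a skippable (binary/asset) file extension."""
--     ext = []
--     for ch in reversed(url):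
--         if ch == '.':
--             return ''.join(reversed(ext)).lower() in _SKIP_EXT_NAMES
--         ext.append(ch)
--     return False
-- ===== Notes on version B (the rewrite author's own statement) =====
-- stated objective: alternative
-- what changed: Instead of testing all 24 dotted extensions with endswith, B walks the string once from the end accumulating characters until the last dot and does a single frozenset membership test on that extension name.
import Mathlib
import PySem

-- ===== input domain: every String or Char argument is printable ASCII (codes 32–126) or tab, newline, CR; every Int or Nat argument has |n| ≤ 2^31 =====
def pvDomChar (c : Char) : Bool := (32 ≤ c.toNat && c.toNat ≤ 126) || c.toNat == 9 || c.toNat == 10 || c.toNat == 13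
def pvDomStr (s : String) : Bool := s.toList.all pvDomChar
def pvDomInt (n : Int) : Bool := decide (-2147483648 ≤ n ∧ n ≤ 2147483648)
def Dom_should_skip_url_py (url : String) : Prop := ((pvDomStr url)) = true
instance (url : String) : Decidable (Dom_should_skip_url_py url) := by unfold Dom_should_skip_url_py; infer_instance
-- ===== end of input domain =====

-- B replaces A's endswith scan over all 24 dotted extensions by one backward walk to the last
-- dot, then a single set-membership test on the extracted extension name (objective: alternative).

-- ===== PORT A =====
def pvSkipExts : List String :=
  [".pdf", ".jpg", ".jpeg", ".png", ".gif", ".svg", ".webp",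
   ".zip", ".tar", ".gz", ".mp4", ".mp3", ".avi", ".mov",
   ".doc", ".docx", ".xls", ".xlsx", ".ppt", ".pptx",
   ".css", ".js", ".json", ".xml", ".rss"]

def should_skip_url_py (url : String) : Bool :=
  let url_lower := PySem.Str.lower url
  pvSkipExts.any (fun ext => PySem.Str.endswith url_lower ext)

-- ===== PORT B =====
def pvSkipNamesList : List String :=
  ["pdf", "jpg", "jpeg", "png", "gif", "svg", "webp",
   "zip", "tar", "gz", "mp4", "mp3", "avi", "mov",
   "doc", "docx", "xls", "xlsx", "ppt", "pptx",
   "css", "js", "json", "xml", "rss"]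

def pvSkipNames : PySem.Set String := PySem.Set.ofList pvSkipNamesList

-- the `for ch in reversed(url)` loop of Source B: walk the reversed characters, accumulating the
-- extension `ext` (consing while walking the reversed list rebuilds it in forward order,
-- exactly as Source B's append-then-reverse-then-join does); at the first dot seen, one set lookup.
def pvAltGo : List Char → List Char → Bool
  | [], _ => false
  | c :: rest, ext =>
      if c = '.' then decide (PySem.Str.lower (String.ofList ext) ∈ pvSkipNames)
      else pvAltGo rest (c :: ext)

def should_skip_url_py_alt (url : String) : Bool :=
  pvAltGo url.toList.reverse []

-- ===== PRECONDITION & SPEC =====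
def Spec_should_skip_url_py (url : String) (out : Bool) : Prop := out = should_skip_url_py_alt url
instance (url : String) (out : Bool) : Decidable (Spec_should_skip_url_py url out) := by unfold Spec_should_skip_url_py; infer_instance

-- ===== CLAIM (what is proved, stated in full; the proofs are below) =====
def Claim_equal_should_skip_url_py : Prop := ∀ (url : String), Dom_should_skip_url_py url → Spec_should_skip_url_py url (should_skip_url_py url)

-- ===== LEMMAS AND PROOFS =====

-- each extension of A's tuple is '.' followed by the corresponding name of B's set
theorem exts_eq_dot_names :
    pvSkipExts.map String.toList = pvSkipNamesList.map (fun n => '.' :: n.toList) := by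
  decide

-- no extension name contains a dot
theorem names_nodot : ∀ n ∈ pvSkipNamesList, '.' ∉ n.toList := by decide

theorem charOfNat_toNat (n : Nat) (h : n.isValidChar) : (Char.ofNat n).toNat = n := by
  unfold Char.ofNat
  rw [dif_pos h]
  simp [Char.ofNatAux, Char.toNat, UInt32.toNat]

theorem lowerChar_eq_dot_iff (c : Char) : PySem.Chars.lowerChar c = '.' ↔ c = '.' := by
  unfold PySem.Chars.lowerChar
  split_ifs with h
  · constructor
    · intro he
      exfalso
      have hb : 65 ≤ c.toNat ∧ c.toNat ≤ 90 := by
        rw [PySem.Chars.isupper, Bool.and_eq_true, decide_eq_true_iff, decide_eq_true_iff,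
          Char.le_def, Char.le_def, UInt32.le_iff_toNat_le, UInt32.le_iff_toNat_le] at h
        exact h
      have hv : (c.toNat + 32).isValidChar := by left; omega
      have h2 : (Char.ofNat (c.toNat + 32)).toNat = 46 := by rw [he]; rfl
      rw [charOfNat_toNat _ hv] at h2
      omega
    · intro he; subst he; exact absurd h (by decide)
  · simp

theorem dot_not_mem_lower (l : List Char) (h : '.' ∉ l) : '.' ∉ PySem.Chars.lower l := by
  intro hm
  unfold PySem.Chars.lower at hm
  rcases List.mem_map.mp hm with ⟨c, hc, he⟩
  exact h ((lowerChar_eq_dot_iff c).mp he ▸ hc)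

-- '.'::name is a suffix of X ++ '.'::acc, with dot-free name and acc, exactly when name = acc
theorem dot_cons_suffix_iff (X name acc : List Char)
    (hn : '.' ∉ name) (ha : '.' ∉ acc) :
    ('.' :: name <:+ X ++ '.' :: acc) ↔ name = acc := by
  constructor
  · intro hs
    rcases List.suffix_or_suffix_of_suffix hs (List.suffix_append X ('.' :: acc)) with h1 | h1
    · rcases h1 with ⟨t, ht⟩
      cases t with
      | nil => exact (List.cons.injEq _ _ _ _ ▸ ht).2 ▸ rfl
      | cons a t' =>
        exfalso
        have : acc = t' ++ '.' :: name := (List.cons.injEq _ _ _ _ |>.mp ht).2.symm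
        exact ha (this ▸ List.mem_append_right t' (List.mem_cons_self))
    · rcases h1 with ⟨t, ht⟩
      cases t with
      | nil => exact ((List.cons.injEq _ _ _ _ ▸ ht).2).symm ▸ rfl
      | cons a t' =>
        exfalso
        have : name = t' ++ '.' :: acc := (List.cons.injEq _ _ _ _ |>.mp ht).2.symm
        exact hn (this ▸ List.mem_append_right t' (List.mem_cons_self))
  · intro he; subst he; exact List.suffix_append X ('.' :: name)

-- loop invariant: pvAltGo on the remaining reversed characters r with accumulated dot-free
-- extension acc computes exactly A's any-endswith test on the lowered full string
theorem altGo_eq (r : List Char) : ∀ (acc : List Char), '.' ∉ acc →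
    pvAltGo r acc =
      pvSkipExts.any (fun e =>
        PySem.Chars.endswith (PySem.Chars.lower (r.reverse ++ acc)) e.toList) := by
  induction r with
  | nil =>
    intro acc ha
    simp only [pvAltGo, List.reverse_nil, List.nil_append]
    symm
    rw [List.any_eq_false]
    intro e he hend
    have hs : e.toList <:+ PySem.Chars.lower acc := (PySem.Chars.endswith_iff _ _).mp hend
    have hdot : '.' ∈ e.toList := by
      have : e.toList ∈ pvSkipExts.map String.toList := List.mem_map_of_mem he
      rw [exts_eq_dot_names] at this
      rcases List.mem_map.mp this with ⟨n, _, hn⟩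
      exact hn ▸ List.mem_cons_self
    exact dot_not_mem_lower acc ha (hs.subset hdot)
  | cons c rest ih =>
    intro acc ha
    by_cases hc : c = '.'
    · subst hc
      simp only [pvAltGo, reduceIte]
      have hsplit : PySem.Chars.lower ((('.' : Char) :: rest).reverse ++ acc) =
          PySem.Chars.lower rest.reverse ++ '.' :: PySem.Chars.lower acc := by
        simp [PySem.Chars.lower]
        decide
      rw [hsplit]
      rw [Bool.eq_iff_iff, decide_eq_true_iff, List.any_eq_true]
      constructor
      · intro hm
        have hmem : PySem.Str.lower (String.ofList acc) ∈ pvSkipNamesList :=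
          (PySem.Set.mem_ofList _ _).mp hm
        have h1 : ('.' :: PySem.Chars.lower acc) ∈ pvSkipExts.map String.toList := by
          rw [exts_eq_dot_names]
          refine List.mem_map.mpr ⟨PySem.Str.lower (String.ofList acc), hmem, ?_⟩
          rw [PySem.Str.toList_lower, String.toList_ofList]
        rcases List.mem_map.mp h1 with ⟨e, he, hee⟩
        refine ⟨e, he, ?_⟩
        rw [PySem.Chars.endswith_iff, hee]
        exact List.suffix_append _ _
      · rintro ⟨e, he, hend⟩
        have hs := (PySem.Chars.endswith_iff _ _).mp hend
        have hmm : e.toList ∈ pvSkipExts.map String.toList := List.mem_map_of_mem he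
        rw [exts_eq_dot_names] at hmm
        rcases List.mem_map.mp hmm with ⟨n, hn, hne⟩
        rw [← hne] at hs
        have heq : n.toList = PySem.Chars.lower acc :=
          (dot_cons_suffix_iff _ _ _ (names_nodot n hn) (dot_not_mem_lower acc ha)).mp hs
        have hln : PySem.Str.lower (String.ofList acc) = n := by
          apply String.toList_inj.mp
          rw [PySem.Str.toList_lower, String.toList_ofList, heq]
        exact (PySem.Set.mem_ofList _ _).mpr (hln ▸ hn)
    · simp only [pvAltGo, if_neg hc]
      rw [ih (c :: acc) (by
        intro hm
        rcases List.mem_cons.mp hm with h | h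
        · exact hc h.symm
        · exact ha h)]
      congr 2
      simp

-- ===== VERDICT (by name: the statement is the Claim_ definition above) =====
theorem should_skip_url_py_spec : Claim_equal_should_skip_url_py := by
  intro url _
  show should_skip_url_py url = should_skip_url_py_alt url
  unfold should_skip_url_py should_skip_url_py_alt
  rw [altGo_eq url.toList.reverse [] (by simp)]
  simp only [List.reverse_reverse, List.append_nil]
  simp [PySem.Str.endswith_eq, PySem.Str.toList_lower]
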